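-- pv_equiv track=rewrite | github.com/tentenlee100/PTT_AKB_POST | daily.py | add_title
-- ===== SOURCE A (Python) =====
-- def add_title(_contents, _title):
--     title_len = 0
--     for s in _title:
--         if len(s) == len(s.encode()):
--             if title_len + 1 < 80:
--                 title_len += 1
--                 _contents += str(s)
--             else:
--                 _contents += "\r\n"
--                 title_len = 1
--                 _contents += str(s)
--         else:
--             if title_len + 2 < 80:
--                 title_len += 2
--                 _contents += str(s)
--             else:
--                 _contents += "\r\n"
--                 title_len = 2
--                 _contents += str(s)
--     _contents += "\r\n"
--
--     return _contents
-- ===== SOURCE B (Python) =====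
-- def add_title(_contents, _title):
--     # Precompute prefix sums of display widths, then locate each line break
--     # with a binary search over the prefix array (each line = maximal segment
--     # of width <= 79), instead of a char-by-char running-width state machine.
--     n = len(_title)
--     pref = [0] * (n + 1)
--     for i, ch in enumerate(_title):
--         pref[i + 1] = pref[i] + (1 if len(ch) == len(ch.encode()) else 2)
--     pieces = []
--     i = 0
--     while i < n:
--         lo, hi = i + 1, n
--         while lo < hi:
--             mid = (lo + hi + 1) // 2
--             if pref[mid] - pref[i] <= 79:
--                 lo = mid
--             else:
--                 hi = mid - 1
--         pieces.append(_title[i:lo])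
--         i = lo
--     if not pieces:
--         pieces = [""]
--     return _contents + "\r\n".join(pieces) + "\r\n"
-- ===== Notes on version B (the rewrite author's own statement) =====
-- stated objective: alternative
-- what changed: B precomputes a prefix-sum array of per-char display widths and locates each line break with a binary search over it (each line = maximal segment of width <= 79), then joins the slices once with CRLF, replacing A's char-by-char running-width state machine that inserts breaks inline by repeated concatenation.
import Mathlib
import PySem

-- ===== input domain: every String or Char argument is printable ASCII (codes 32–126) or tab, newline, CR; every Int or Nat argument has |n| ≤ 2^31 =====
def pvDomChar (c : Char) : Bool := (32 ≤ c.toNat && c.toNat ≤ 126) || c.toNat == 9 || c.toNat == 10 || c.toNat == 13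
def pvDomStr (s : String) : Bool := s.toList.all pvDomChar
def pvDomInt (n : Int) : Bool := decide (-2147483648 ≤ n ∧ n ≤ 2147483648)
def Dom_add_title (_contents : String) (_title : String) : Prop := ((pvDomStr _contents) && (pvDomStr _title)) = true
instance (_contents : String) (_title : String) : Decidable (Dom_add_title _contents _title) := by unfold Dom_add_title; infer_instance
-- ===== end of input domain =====

-- B precomputes a prefix-sum array of display widths and finds each line break by binary
-- search over it, instead of A's char-by-char running-width break insertion; return values
-- proved equal on Dom (objective: alternative algorithm, same asymptotic cost).


-- ===== PORT A =====
-- len(s) == len(s.encode()) for a single char s holds iff its UTF-8 encoding is one byte,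
-- i.e. iff its codepoint is < 128 (exact for every Unicode char).
def addTitleStepA (st : List Char × Int) (s : Char) : List Char × Int :=
  if s.toNat < 128 then
    if st.2 + 1 < 80 then (st.1 ++ [s], st.2 + 1)
    else (st.1 ++ ['\r', '\n', s], 1)
  else
    if st.2 + 2 < 80 then (st.1 ++ [s], st.2 + 2)
    else (st.1 ++ ['\r', '\n', s], 2)

def add_title (_contents : String) (_title : String) : String :=
  let st := _title.toList.foldl addTitleStepA (_contents.toList, 0)
  String.mk (st.1 ++ ['\r', '\n'])

-- ===== PORT B =====
-- width of one char: 1 if len(ch) == len(ch.encode()) (codepoint < 128, exact), else 2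
def widthB (c : Char) : Int := if c.toNat < 128 then 1 else 2

-- the `for i, ch in enumerate(_title): pref[i+1] = pref[i] + w` loop, carrying pref[i]
def buildPref : List Char → Int → List Int
  | [], _ => []
  | c :: cs, acc => (acc + widthB c) :: buildPref cs (acc + widthB c)

-- pref = [0] * (n+1) filled by the loop above
def prefOf (ts : List Char) : List Int := 0 :: buildPref ts 0

-- the inner `while lo < hi` binary search; Python indices here are always in-range
-- naturals, so `pref[mid]` is ported as `pref.getD mid 0` (exact on those indices)
-- `fuel` only bounds the number of iterations (any fuel ≥ hi - lo gives the loop's value);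
-- it keeps the recursion structural so the kernel can evaluate it
def bsearchB (pref : List Int) (base : Int) : Nat → Nat → Nat → Nat
  | 0, lo, _ => lo
  | fuel + 1, lo, hi =>
    if lo < hi then
      let mid := (lo + hi + 1) / 2
      if pref.getD mid 0 - base ≤ 79 then bsearchB pref base fuel mid hi
      else bsearchB pref base fuel lo (mid - 1)
    else lo

-- the outer `while i < n` loop; _title[i:j] with 0 ≤ i ≤ j is exactly drop-then-take;
-- `fuel` is again only an iteration bound (any fuel ≥ n - i gives the loop's value)
def buildPieces (ts : List Char) (pref : List Int) (n : Nat) : Nat → Nat → List (List Char)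
  | 0, _ => []
  | fuel + 1, i =>
    if i < n then
      let j := bsearchB pref (pref.getD i 0) n (i + 1) n
      ((ts.drop i).take (j - i)) :: buildPieces ts pref n fuel j
    else []

-- hand-written port of `"\r\n".join(pieces)` (exact: Python's join)
def crlfJoin : List (List Char) → List Char
  | [] => []
  | [l] => l
  | l :: ls => l ++ '\r' :: '\n' :: crlfJoin ls

def add_title_alt (_contents : String) (_title : String) : String :=
  let ts := _title.toList
  let pref := prefOf ts
  let pieces := buildPieces ts pref ts.length ts.length 0
  let pieces' := if pieces = [] then [([] : List Char)] else pieces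
  String.mk (_contents.toList ++ crlfJoin pieces' ++ ['\r', '\n'])

-- ===== PRECONDITION & SPEC =====
def Spec_add_title (_contents : String) (_title : String) (out : String) : Prop := out = add_title_alt _contents _title
instance (_contents : String) (_title : String) (out : String) : Decidable (Spec_add_title _contents _title out) := by unfold Spec_add_title; infer_instance

-- ===== CLAIM (what is proved, stated in full; the proofs are below) =====
def Claim_equal_add_title : Prop := ∀ (_contents : String) (_title : String), Dom_add_title _contents _title → Spec_add_title _contents _title (add_title _contents _title)

-- ===== LEMMAS AND PROOFS =====

-- proof-only middle model: A's loop refactored as a direct recursion over the title,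
-- producing the list of packed lines (consumeL) and the final running width (finW)
def consumeL : List Char → Int → List Char → List (List Char)
  | buf, _, [] => [buf]
  | buf, tl, c :: cs =>
    if tl + widthB c < 80 then consumeL (buf ++ [c]) (tl + widthB c) cs
    else buf :: consumeL [c] (widthB c) cs

def finW : Int → List Char → Int
  | tl, [] => tl
  | tl, c :: cs => if tl + widthB c < 80 then finW (tl + widthB c) cs else finW (widthB c) cs

-- proof-only: greedy split of one line (maximal prefix of width ≤ 79 on top of tl)
def chopL : List Char → Int → List Char × List Char
  | [], _ => ([], [])
  | c :: cs, tl =>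
    if tl + widthB c < 80 then
      let p := chopL cs (tl + widthB c)
      (c :: p.1, p.2)
    else ([], c :: cs)

def widthSum (l : List Char) : Int := (l.map widthB).sum

theorem widthB_bounds (c : Char) : 1 ≤ widthB c ∧ widthB c ≤ 2 := by
  unfold widthB; split <;> norm_num

theorem consumeL_ne_nil : ∀ (rs buf : List Char) (tl : Int), consumeL buf tl rs ≠ [] := by
  intro rs
  induction rs with
  | nil => intro buf tl; simp [consumeL]
  | cons c cs ih =>
      intro buf tl
      unfold consumeL
      split
      · exact ih _ _
      · simp

theorem crlfJoin_cons (l : List Char) (ls : List (List Char)) (h : ls ≠ []) :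
    crlfJoin (l :: ls) = l ++ '\r' :: '\n' :: crlfJoin ls := by
  cases ls with
  | nil => exact absurd rfl h
  | cons a as => rfl

-- A's fold equals pre ++ join of the consumeL lines
theorem foldA (ts : List Char) : ∀ (pre buf : List Char) (tl : Int),
    ts.foldl addTitleStepA (pre ++ buf, tl) = (pre ++ crlfJoin (consumeL buf tl ts), finW tl ts) := by
  induction ts with
  | nil => intro pre buf tl; simp [consumeL, finW, crlfJoin]
  | cons c cs ih =>
      intro pre buf tl
      simp only [List.foldl_cons]
      by_cases h1 : c.toNat < 128
      · by_cases h2 : tl + 1 < 80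
        · have h := ih pre (buf ++ [c]) (tl + 1)
          simpa [addTitleStepA, consumeL, finW, widthB, h1, h2, List.append_assoc] using h
        · have h := ih (pre ++ buf ++ ['\r', '\n']) [c] 1
          rw [show addTitleStepA (pre ++ buf, tl) c = (pre ++ buf ++ ['\r', '\n'] ++ [c], 1) from by
            simp [addTitleStepA, h1, h2, List.append_assoc]]
          rw [h]
          rw [show consumeL buf tl (c :: cs) = buf :: consumeL [c] 1 cs from by
            simp [consumeL, widthB, h1, h2]]
          rw [crlfJoin_cons _ _ (consumeL_ne_nil _ _ _)]
          simp [finW, widthB, h1, h2, List.append_assoc]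
      · by_cases h2 : tl + 2 < 80
        · have h := ih pre (buf ++ [c]) (tl + 2)
          simpa [addTitleStepA, consumeL, finW, widthB, h1, h2, List.append_assoc] using h
        · have h := ih (pre ++ buf ++ ['\r', '\n']) [c] 2
          rw [show addTitleStepA (pre ++ buf, tl) c = (pre ++ buf ++ ['\r', '\n'] ++ [c], 2) from by
            simp [addTitleStepA, h1, h2, List.append_assoc]]
          rw [h]
          rw [show consumeL buf tl (c :: cs) = buf :: consumeL [c] 2 cs from by
            simp [consumeL, widthB, h1, h2]]
          rw [crlfJoin_cons _ _ (consumeL_ne_nil _ _ _)]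
          simp [finW, widthB, h1, h2, List.append_assoc]

theorem A_eq (c t : String) :
    add_title c t = String.mk (c.toList ++ crlfJoin (consumeL [] 0 t.toList) ++ ['\r', '\n']) := by
  unfold add_title
  have h := foldA t.toList c.toList [] 0
  simp only [List.append_nil] at h
  rw [h]

theorem chop_append : ∀ (rs : List Char) (tl : Int), (chopL rs tl).1 ++ (chopL rs tl).2 = rs := by
  intro rs
  induction rs with
  | nil => intro tl; simp [chopL]
  | cons c cs ih =>
      intro tl
      by_cases hfit : tl + widthB c < 80
      · have hchop : chopL (c :: cs) tl =
            (c :: (chopL cs (tl + widthB c)).1, (chopL cs (tl + widthB c)).2) := by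
          simp [chopL, hfit]
        rw [hchop]
        simpa using ih (tl + widthB c)
      · have hchop : chopL (c :: cs) tl = ([], c :: cs) := by simp [chopL, hfit]
        rw [hchop]
        simp

theorem chop_width_le : ∀ (rs : List Char) (tl : Int), tl ≤ 79 → tl + widthSum (chopL rs tl).1 ≤ 79 := by
  intro rs
  induction rs with
  | nil => intro tl h; simpa [chopL, widthSum] using h
  | cons c cs ih =>
      intro tl h
      by_cases hfit : tl + widthB c < 80
      · have hchop : chopL (c :: cs) tl =
            (c :: (chopL cs (tl + widthB c)).1, (chopL cs (tl + widthB c)).2) := by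
          simp [chopL, hfit]
        rw [hchop]
        have h' := ih (tl + widthB c) (by omega)
        simp only [widthSum, List.map_cons, List.sum_cons] at *
        omega
      · have hchop : chopL (c :: cs) tl = ([], c :: cs) := by simp [chopL, hfit]
        rw [hchop]
        simpa [widthSum] using h

theorem chop_next : ∀ (rs : List Char) (tl : Int) (c' : Char) (r' : List Char),
    (chopL rs tl).2 = c' :: r' → 80 ≤ tl + widthSum (chopL rs tl).1 + widthB c' := by
  intro rs
  induction rs with
  | nil => intro tl c' r' h; simp [chopL] at h
  | cons c cs ih =>
      intro tl c' r' h
      by_cases hfit : tl + widthB c < 80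
      · have hchop : chopL (c :: cs) tl =
            (c :: (chopL cs (tl + widthB c)).1, (chopL cs (tl + widthB c)).2) := by
          simp [chopL, hfit]
        rw [hchop] at h ⊢
        have h' := ih (tl + widthB c) c' r' h
        simp only [widthSum, List.map_cons, List.sum_cons] at *
        omega
      · have hchop : chopL (c :: cs) tl = ([], c :: cs) := by simp [chopL, hfit]
        rw [hchop] at h ⊢
        injection h with h1 h2
        subst h1
        simp only [widthSum, List.map_nil, List.sum_nil]
        omega

theorem consume_line : ∀ (rs buf : List Char) (tl : Int),
    consumeL buf tl rs =
      (buf ++ (chopL rs tl).1) ::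
        (if (chopL rs tl).2 = [] then [] else consumeL [] 0 (chopL rs tl).2) := by
  intro rs
  induction rs with
  | nil => intro buf tl; simp [consumeL, chopL]
  | cons c cs ih =>
      intro buf tl
      by_cases h : tl + widthB c < 80
      · have hchop : chopL (c :: cs) tl =
            (c :: (chopL cs (tl + widthB c)).1, (chopL cs (tl + widthB c)).2) := by
          simp [chopL, h]
        have h' := ih (buf ++ [c]) (tl + widthB c)
        rw [hchop]
        simp only [consumeL, h, if_true]
        simpa [List.append_assoc] using h'
      · have h0 : (0 : Int) + widthB c < 80 := by
          have := widthB_bounds c; omega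
        have hchop : chopL (c :: cs) tl = ([], c :: cs) := by simp [chopL, h]
        rw [hchop]
        simp [consumeL, h, show widthB c < 80 from by omega]

theorem buildPref_getD : ∀ (cs : List Char) (acc : Int) (m : Nat), m < cs.length →
    (buildPref cs acc).getD m 0 = acc + widthSum (cs.take (m + 1)) := by
  intro cs
  induction cs with
  | nil => intro acc m h; simp at h
  | cons c cs ih =>
      intro acc m h
      cases m with
      | zero => simp [buildPref, widthSum]
      | succ m =>
          have h' := ih (acc + widthB c) m (by simpa using h)
          simp only [buildPref, List.getD_cons_succ, List.take_succ_cons, widthSum,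
            List.map_cons, List.sum_cons] at *
          omega

theorem prefOf_getD (ts : List Char) (m : Nat) (h : m ≤ ts.length) :
    (prefOf ts).getD m 0 = widthSum (ts.take m) := by
  cases m with
  | zero => simp [prefOf, widthSum]
  | succ m =>
      have h' := buildPref_getD ts 0 m (by omega)
      simp only [prefOf, List.getD_cons_succ]
      omega

theorem widthSum_nonneg (l : List Char) : 0 ≤ widthSum l := by
  apply List.sum_nonneg
  intro x hx
  simp only [List.mem_map] at hx
  obtain ⟨c, _, rfl⟩ := hx
  have := widthB_bounds c
  omega

theorem widthSum_append (a b : List Char) : widthSum (a ++ b) = widthSum a + widthSum b := by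
  simp [widthSum]

theorem widthSum_take_segment (ts : List Char) (i j : Nat) (hij : i ≤ j) :
    widthSum (ts.take j) = widthSum (ts.take i) + widthSum ((ts.drop i).take (j - i)) := by
  have h : ts.take j = ts.take i ++ (ts.drop i).take (j - i) := by
    rw [← List.take_add]
    congr 1
    omega
  rw [h, widthSum_append]

theorem widthSum_take_mono (ts : List Char) (a b : Nat) (hab : a ≤ b) :
    widthSum (ts.take a) ≤ widthSum (ts.take b) := by
  have h1 := widthSum_take_segment ts a b hab
  have h2 := widthSum_nonneg ((ts.drop a).take (b - a))
  omega

theorem bsearch_spec (pref : List Int) (base : Int) :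
    ∀ (k lo hi : Nat), hi - lo ≤ k → lo ≤ hi →
      pref.getD lo 0 - base ≤ 79 →
      (∀ a b : Nat, a ≤ b → b ≤ hi → pref.getD b 0 - base ≤ 79 → pref.getD a 0 - base ≤ 79) →
      lo ≤ bsearchB pref base k lo hi ∧ bsearchB pref base k lo hi ≤ hi ∧
        pref.getD (bsearchB pref base k lo hi) 0 - base ≤ 79 ∧
        (∀ m, m ≤ hi → pref.getD m 0 - base ≤ 79 → m ≤ bsearchB pref base k lo hi) := by
  intro k
  induction k with
  | zero =>
      intro lo hi hk hle hP _
      have heq : bsearchB pref base 0 lo hi = lo := rfl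
      rw [heq]
      exact ⟨le_refl _, hle, hP, fun m hm _ => by omega⟩
  | succ k ih =>
      intro lo hi hk hle hP hAnti
      rw [bsearchB]
      by_cases h : lo < hi
      · simp only [if_pos h]
        by_cases hmid : pref.getD ((lo + hi + 1) / 2) 0 - base ≤ 79
        · simp only [if_pos hmid]
          have h' := ih ((lo + hi + 1) / 2) hi (by omega) (by omega) hmid hAnti
          exact ⟨by omega, h'.2.1, h'.2.2.1, h'.2.2.2⟩
        · simp only [if_neg hmid]
          have hAnti' : ∀ a b : Nat, a ≤ b → b ≤ (lo + hi + 1) / 2 - 1 →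
              pref.getD b 0 - base ≤ 79 → pref.getD a 0 - base ≤ 79 := by
            intro a b hab hb hPb
            exact hAnti a b hab (by omega) hPb
          have h' := ih lo ((lo + hi + 1) / 2 - 1) (by omega) (by omega) hP hAnti'
          refine ⟨h'.1, by omega, h'.2.2.1, ?_⟩
          intro m hm hPm
          by_cases hm' : m ≤ (lo + hi + 1) / 2 - 1
          · exact h'.2.2.2 m hm' hPm
          · exact absurd (hAnti _ m (by omega) hm hPm) hmid
      · simp only [if_neg h]
        exact ⟨le_refl _, hle, hP, fun m hm _ => by omega⟩

theorem buildPieces_stop (ts : List Char) (pf : List Int) (n fuel i : Nat) (h : ¬ i < n) :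
    buildPieces ts pf n fuel i = [] := by
  cases fuel with
  | zero => rfl
  | succ fuel => rw [buildPieces]; simp [h]

theorem pieces_eq : ∀ (k : Nat) (ts : List Char) (i : Nat), ts.length - i ≤ k → i < ts.length →
    buildPieces ts (prefOf ts) ts.length k i = consumeL [] 0 (ts.drop i) := by
  intro k
  induction k with
  | zero => intro ts i hk hi; omega
  | succ k ih =>
      intro ts i hk hi
      set n := ts.length with hn
      set pref := prefOf ts with hpref
      set rs := ts.drop i with hrs
      set p := chopL rs 0 with hp
      set k0 := p.1.length with hk0
      have hrslen : rs.length = n - i := by simp [hrs, hn]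
      have hrsne : rs ≠ [] := by
        intro hAbs; rw [hAbs] at hrslen; simp at hrslen; omega
      have hsplit : p.1 ++ p.2 = rs := chop_append rs 0
      have hk0le : k0 ≤ n - i := by
        have h1 : p.1.length ≤ rs.length := by
          rw [← hsplit]; simp
        omega
      have hp1 : p.1 = rs.take k0 := by
        conv_rhs => rw [← hsplit]
        rw [hk0, List.take_left]
      have hp2 : p.2 = rs.drop k0 := by
        conv_rhs => rw [← hsplit]
        rw [hk0, List.drop_left]
      have hk0pos : 1 ≤ k0 := by
        obtain ⟨c, cs, hc⟩ := List.exists_cons_of_ne_nil hrsne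
        have hw := widthB_bounds c
        have h1 : p.1 = c :: (chopL cs (0 + widthB c)).1 := by
          rw [hp, hc]
          simp [chopL, show widthB c < 80 from by omega]
        rw [hk0, h1]; simp
      have hP79 : widthSum p.1 ≤ 79 := by
        have h1 := chop_width_le rs 0 (by norm_num)
        rw [← hp] at h1
        omega
      have hgetD : ∀ m, m ≤ n → pref.getD m 0 = widthSum (ts.take m) :=
        fun m hm => prefOf_getD ts m hm
      have hb := bsearch_spec pref (pref.getD i 0) n (i + 1) n (by omega) (by omega)
        (by
          rw [hgetD (i + 1) (by omega), hgetD i (by omega),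
            widthSum_take_segment ts i (i + 1) (by omega)]
          obtain ⟨c, cs, hc⟩ := List.exists_cons_of_ne_nil hrsne
          rw [show i + 1 - i = 1 from by omega, ← hrs, hc]
          have hw := widthB_bounds c
          simp only [List.take_succ_cons, List.take_zero, widthSum, List.map_cons,
            List.map_nil, List.sum_cons, List.sum_nil]
          omega)
        (by
          intro a b hab hbn hPb
          rw [hgetD b hbn] at hPb
          rw [hgetD a (by omega)]
          have hm := widthSum_take_mono ts a b hab
          omega)
      set j := bsearchB pref (pref.getD i 0) n (i + 1) n with hj
      obtain ⟨hj1, hj2, hPj, hmax⟩ := hb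
      have hPik0 : pref.getD (i + k0) 0 - pref.getD i 0 ≤ 79 := by
        rw [hgetD (i + k0) (by omega), hgetD i (by omega),
          widthSum_take_segment ts i (i + k0) (by omega)]
        rw [show i + k0 - i = k0 from by omega, ← hrs, ← hp1]
        omega
      have hle1 : i + k0 ≤ j := hmax (i + k0) (by omega) hPik0
      have hge1 : j ≤ i + k0 := by
        by_contra hAbs
        push_neg at hAbs
        have hk0lt : k0 < n - i := by omega
        have hp2ne : p.2 ≠ [] := by
          rw [hp2]
          intro hAbs2
          have h3 := List.drop_eq_nil_iff.mp hAbs2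
          omega
        obtain ⟨c', r', hc'⟩ := List.exists_cons_of_ne_nil hp2ne
        have hnext := chop_next rs 0 c' r' (by rw [← hp]; exact hc')
        rw [← hp] at hnext
        have htake : rs.take (k0 + 1) = p.1 ++ [c'] := by
          conv_lhs => rw [← hsplit, hc']
          rw [show k0 + 1 = p.1.length + 1 from by omega]
          rw [List.take_append]
          simp
        have hPk1 : pref.getD (i + k0 + 1) 0 - pref.getD i 0 ≤ 79 := by
          have hPj' := hPj
          rw [hgetD j (by omega), hgetD i (by omega)] at hPj'
          have hmono := widthSum_take_mono ts (i + k0 + 1) j (by omega)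
          rw [hgetD (i + k0 + 1) (by omega), hgetD i (by omega)]
          omega
        have hseg := widthSum_take_segment ts i (i + k0 + 1) (by omega)
        rw [show i + k0 + 1 - i = k0 + 1 from by omega, ← hrs, htake, widthSum_append] at hseg
        rw [hgetD (i + k0 + 1) (by omega), hgetD i (by omega)] at hPk1
        have hc'w : widthSum [c'] = widthB c' := by simp [widthSum]
        omega
      have hjeq : j = i + k0 := by omega
      rw [buildPieces]
      simp only [if_pos hi]
      rw [consume_line rs [] 0, ← hp]
      rw [show (ts.drop i).take (j - i) = p.1 from by
        rw [← hrs, hjeq, show i + k0 - i = k0 from by omega, hp1]]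
      simp only [List.nil_append]
      congr 1
      have hdropj : ts.drop j = p.2 := by
        rw [hjeq, hp2, hrs, List.drop_drop]
        try congr 1
        try omega
      by_cases hnil : p.2 = []
      · have hjn : n ≤ j := by
          rw [hnil] at hdropj
          have := List.drop_eq_nil_iff.mp hdropj
          omega
        rw [hnil, if_pos rfl]
        exact buildPieces_stop ts pref n k j (by omega)
      · rw [if_neg hnil]
        have hjlt : j < n := by
          have hlen : p.2.length = n - j := by
            rw [← hdropj]; simp [hn]
          have := List.length_pos_of_ne_nil hnil
          omega
        rw [ih ts j (by omega) hjlt, hdropj]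

theorem B_eq (c t : String) :
    add_title_alt c t = String.mk (c.toList ++ crlfJoin (consumeL [] 0 t.toList) ++ ['\r', '\n']) := by
  simp only [add_title_alt]
  by_cases h : t.toList = []
  · rw [buildPieces_stop _ _ _ _ 0 (by simp [h])]
    simp [h, consumeL, crlfJoin]
  · have h0 : 0 < t.toList.length := List.length_pos_of_ne_nil h
    have hpieces := pieces_eq t.toList.length t.toList 0 (by omega) h0
    simp only [List.drop_zero] at hpieces
    rw [hpieces, if_neg (consumeL_ne_nil t.toList [] 0)]

-- ===== VERDICT (by name: the statement is the Claim_ definition above) =====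
theorem add_title_spec : Claim_equal_add_title := by
  intro c t _
  unfold Spec_add_title
  rw [A_eq, B_eq]
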